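-- pv_equiv track=rewrite | github.com/zengzhishi/pycmake | pycmake/util.py | unbalanced_quotes
-- ===== SOURCE A (Python) =====
-- def unbalanced_quotes(s):
--     single = 0
--     double = 0
--     excute = 0
--     for c in s:
--         if c == "'":
--             single += 1
--         elif c == '"':
--             double += 1
--         elif c == "`":
--             excute += 1
--
--     move_double = s.count('\\"')
--     move_single = s.count("\\'")
--     single -= move_single
--     double -= move_double
--
--     is_half_quote = single % 2 == 1 or double % 2 == 1 or excute % 2 == 1
--     return is_half_quote
-- ===== SOURCE B (Python) =====
-- def unbalanced_quotes(s):
--     single = double = excute = False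
--     i, n = 0, len(s)
--     while i < n:
--         c = s[i]
--         if c == '\\' and i + 1 < n and s[i + 1] in ("'", '"'):
--             i += 2
--             continue
--         if c == "'":
--             single = not single
--         elif c == '"':
--             double = not double
--         elif c == '`':
--             excute = not excute
--         i += 1
--     return single or double or excute
-- ===== Notes on version B (the rewrite author's own statement) =====
-- stated objective: alternative
-- what changed: Replaces count-then-subtract arithmetic (three counters plus two substring counts and a parity test) with a single left-to-right escape-aware state machine that skips escaped quotes as it scans and toggles one parity bit per quote character.
import Mathlib
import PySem

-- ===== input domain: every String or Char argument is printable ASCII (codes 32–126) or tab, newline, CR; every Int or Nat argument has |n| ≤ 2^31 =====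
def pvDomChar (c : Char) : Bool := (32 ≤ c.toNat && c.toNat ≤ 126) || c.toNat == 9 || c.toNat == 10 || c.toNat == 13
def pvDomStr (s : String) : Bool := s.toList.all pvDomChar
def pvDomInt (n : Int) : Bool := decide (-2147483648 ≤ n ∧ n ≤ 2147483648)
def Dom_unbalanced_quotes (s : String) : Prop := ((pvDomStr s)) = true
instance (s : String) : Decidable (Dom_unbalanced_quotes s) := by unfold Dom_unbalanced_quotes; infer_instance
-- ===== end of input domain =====

-- B replaces A's count-then-subtract arithmetic by a single escape-aware
-- left-to-right scan that skips escaped quotes and toggles one parity bit per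
-- quote character (alternative algorithm; same return value on all inputs).

-- ===== PORT A =====
-- one step of A's for-loop over the characters, state = (single, double, excute)
def uqStepA (acc : Int × Int × Int) (c : Char) : Int × Int × Int :=
  if c = '\'' then (acc.1 + 1, acc.2.1, acc.2.2)
  else if c = '"' then (acc.1, acc.2.1 + 1, acc.2.2)
  else if c = '`' then (acc.1, acc.2.1, acc.2.2 + 1)
  else acc

def unbalanced_quotes (s : String) : Bool :=
  let st := s.toList.foldl uqStepA (0, 0, 0)
  let move_double : Int := (PySem.Str.count s "\\\"" : Int)
  let move_single : Int := (PySem.Str.count s "\\'" : Int)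
  let single := st.1 - move_single
  let double := st.2.1 - move_double
  (PySem.Int.mod single 2 == 1) || (PySem.Int.mod double 2 == 1) || (PySem.Int.mod st.2.2 2 == 1)

-- ===== PORT B =====
-- Source B's loop body when a character is consumed on its own: toggle its parity bit
def uqToggle (c : Char) (st : Bool × Bool × Bool) : Bool × Bool × Bool :=
  if c = '\'' then (!st.1, st.2.1, st.2.2)
  else if c = '"' then (st.1, !st.2.1, st.2.2)
  else if c = '`' then (st.1, st.2.1, !st.2.2)
  else st

-- Source B's while-loop: advance two over an escaped quote, otherwise toggle and advance one
def uqLoop : List Char → Bool × Bool × Bool → Bool × Bool × Bool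
  | [], st => st
  | [c], st => uqToggle c st
  | c :: c2 :: rest, st =>
    if c = '\\' ∧ (c2 = '\'' ∨ c2 = '"') then uqLoop rest st
    else uqLoop (c2 :: rest) (uqToggle c st)

def unbalanced_quotes_alt (s : String) : Bool :=
  let st := uqLoop s.toList (false, false, false)
  st.1 || st.2.1 || st.2.2

-- ===== PRECONDITION & SPEC =====
def Spec_unbalanced_quotes (s : String) (out : Bool) : Prop := out = unbalanced_quotes_alt s
instance (s : String) (out : Bool) : Decidable (Spec_unbalanced_quotes s out) := by unfold Spec_unbalanced_quotes; infer_instance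

-- ===== CLAIM (what is proved, stated in full; the proofs are below) =====
def Claim_equal_unbalanced_quotes : Prop := ∀ (s : String), Dom_unbalanced_quotes s → Spec_unbalanced_quotes s (unbalanced_quotes s)

-- ===== LEMMAS AND PROOFS =====

-- greedy left-to-right count of the two-character pattern '\\' q (proof-side mirror
-- of Python's s.count for these patterns)
def uqCnt2 (q : Char) : List Char → Nat
  | [] => 0
  | [_] => 0
  | c :: c2 :: rest =>
    if c = '\\' ∧ c2 = q then 1 + uqCnt2 q rest else uqCnt2 q (c2 :: rest)

-- Python's s.count('\\' + q) is the greedy two-character count.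
theorem uq_count_go_two (q : Char) : ∀ (fuel : Nat) (l : List Char) (acc : Nat),
    l.length ≤ fuel → PySem.Chars.count.go ['\\', q] fuel l acc = acc + uqCnt2 q l := by
  intro fuel
  induction fuel with
  | zero =>
    intro l acc h
    cases l with
    | nil => simp [PySem.Chars.count.go, uqCnt2]
    | cons h t => simp at h
  | succ n ih =>
    intro l acc h
    match l with
    | [] => simp [PySem.Chars.count.go, uqCnt2]
    | [x] =>
      have hp : List.isPrefixOf ['\\', q] [x] = false := by
        simp [List.isPrefixOf]
      simp only [PySem.Chars.count.go, hp, Bool.false_eq_true, if_false]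
      rw [ih [] acc (by simp)]
      simp [uqCnt2]
    | x :: y :: t =>
      simp only [PySem.Chars.count.go]
      by_cases hp : List.isPrefixOf ['\\', q] (x :: y :: t) = true
      · have hx : x = '\\' ∧ y = q := by
          simp only [List.isPrefixOf, Bool.and_eq_true, beq_iff_eq] at hp
          exact ⟨hp.1.symm, hp.2.1.symm⟩
        rw [if_pos hp]
        simp only [List.length_cons, List.length_nil, List.drop_succ_cons, List.drop_zero]
        rw [ih t (acc + 1) (by simp at h ⊢; omega)]
        rw [uqCnt2, if_pos hx]
        omega
      · rw [if_neg hp]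
        rw [ih (y :: t) acc (by simp at h ⊢; omega)]
        have hx : ¬ (x = '\\' ∧ y = q) := by
          intro ⟨h1, h2⟩
          exact hp (by simp [List.isPrefixOf, h1, h2])
        rw [uqCnt2, if_neg hx]

theorem uq_count_two (q : Char) (l : List Char) :
    PySem.Chars.count l ['\\', q] = uqCnt2 q l := by
  simpa [PySem.Chars.count] using uq_count_go_two q l.length l 0 le_rfl

-- A's loop computes exactly the three character counts.
theorem uq_fold_counts : ∀ (l : List Char) (a b e : Int),
    l.foldl uqStepA (a, b, e) =
      (a + l.count '\'', b + l.count '"', e + l.count '`') := by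
  intro l
  induction l with
  | nil => intro a b e; simp
  | cons x t ih =>
    intro a b e
    simp only [List.foldl_cons, uqStepA]
    split_ifs with h1 h2 h3 <;>
      simp_all [Prod.ext_iff] <;> omega

-- parity bit of a quote character: raw occurrences plus escaped occurrences
def uqParQ (q : Char) (l : List Char) : Bool := (l.count q + uqCnt2 q l) % 2 == 1
def uqParE (l : List Char) : Bool := l.count '`' % 2 == 1

theorem uq_parity_succ (k : Nat) : ((k + 1) % 2 == 1) = !(k % 2 == 1) := by
  rcases Nat.mod_two_eq_zero_or_one k with h | h <;> simp [Nat.add_mod, h]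

-- single consumed character: the toggle realises the parity of the extended list
theorem uq_toggle_eq (c : Char) (t : List Char) (s d e : Bool)
    (hS : uqCnt2 '\'' (c :: t) = uqCnt2 '\'' t)
    (hD : uqCnt2 '"' (c :: t) = uqCnt2 '"' t) :
    ((uqToggle c (s, d, e)).1 ^^ uqParQ '\'' t,
     (uqToggle c (s, d, e)).2.1 ^^ uqParQ '"' t,
     (uqToggle c (s, d, e)).2.2 ^^ uqParE t)
      = (s ^^ uqParQ '\'' (c :: t), d ^^ uqParQ '"' (c :: t), e ^^ uqParE (c :: t)) := by
  by_cases h1 : c = '\''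
  · subst h1
    have e1 : uqParQ '\'' ('\'' :: t) = !uqParQ '\'' t := by
      unfold uqParQ
      rw [hS, List.count_cons_self]
      rw [show t.count '\'' + 1 + uqCnt2 '\'' t = t.count '\'' + uqCnt2 '\'' t + 1 by omega]
      exact uq_parity_succ _
    have e2 : uqParQ '"' ('\'' :: t) = uqParQ '"' t := by
      unfold uqParQ
      rw [hD, List.count_cons_of_ne (by decide)]
    have e3 : uqParE ('\'' :: t) = uqParE t := by
      unfold uqParE
      rw [List.count_cons_of_ne (by decide)]
    simp [uqToggle, e1, e2, e3]
  · by_cases h2 : c = '"'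
    · subst h2
      have e1 : uqParQ '\'' ('"' :: t) = uqParQ '\'' t := by
        unfold uqParQ
        rw [hS, List.count_cons_of_ne (by decide)]
      have e2 : uqParQ '"' ('"' :: t) = !uqParQ '"' t := by
        unfold uqParQ
        rw [hD, List.count_cons_self]
        rw [show t.count '"' + 1 + uqCnt2 '"' t = t.count '"' + uqCnt2 '"' t + 1 by omega]
        exact uq_parity_succ _
      have e3 : uqParE ('"' :: t) = uqParE t := by
        unfold uqParE
        rw [List.count_cons_of_ne (by decide)]
      simp [uqToggle, e1, e2, e3, h1]
    · by_cases h3 : c = '`'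
      · subst h3
        have e1 : uqParQ '\'' ('`' :: t) = uqParQ '\'' t := by
          unfold uqParQ
          rw [hS, List.count_cons_of_ne (by decide)]
        have e2 : uqParQ '"' ('`' :: t) = uqParQ '"' t := by
          unfold uqParQ
          rw [hD, List.count_cons_of_ne (by decide)]
        have e3 : uqParE ('`' :: t) = !uqParE t := by
          unfold uqParE
          rw [List.count_cons_self]
          exact uq_parity_succ _
        simp [uqToggle, e1, e2, e3, h1, h2]
      · have e1 : uqParQ '\'' (c :: t) = uqParQ '\'' t := by
          unfold uqParQ
          rw [hS, List.count_cons_of_ne h1]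
        have e2 : uqParQ '"' (c :: t) = uqParQ '"' t := by
          unfold uqParQ
          rw [hD, List.count_cons_of_ne h2]
        have e3 : uqParE (c :: t) = uqParE t := by
          unfold uqParE
          rw [List.count_cons_of_ne h3]
        simp [uqToggle, e1, e2, e3, h1, h2, h3]

-- B's scan computes the xor of the incoming bits with the three parities.
theorem uq_loop_eq : ∀ (n : Nat) (l : List Char), l.length ≤ n → ∀ (s d e : Bool),
    uqLoop l (s, d, e) =
      (xor s (uqParQ '\'' l), xor d (uqParQ '"' l), xor e (uqParE l)) := by
  intro n
  induction n with
  | zero =>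
    intro l h s d e
    cases l with
    | nil => simp [uqLoop, uqParQ, uqParE, uqCnt2]
    | cons c t => simp at h
  | succ n ih =>
    intro l h s d e
    match l with
    | [] => simp [uqLoop, uqParQ, uqParE, uqCnt2]
    | [c] =>
      have hS : uqCnt2 '\'' [c] = uqCnt2 '\'' [] := by simp [uqCnt2]
      have hD : uqCnt2 '"' [c] = uqCnt2 '"' [] := by simp [uqCnt2]
      have := uq_toggle_eq c [] s d e hS hD
      simp only [uqParQ, uqParE, uqCnt2, List.count_nil, Nat.add_zero] at this
      simpa [uqLoop] using this
    | c :: c2 :: rest =>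
      rw [show uqLoop (c :: c2 :: rest) (s, d, e) =
            if c = '\\' ∧ (c2 = '\'' ∨ c2 = '"') then uqLoop rest (s, d, e)
            else uqLoop (c2 :: rest) (uqToggle c (s, d, e)) from rfl]
      by_cases hesc : c = '\\' ∧ (c2 = '\'' ∨ c2 = '"')
      · rw [if_pos hesc]
        obtain ⟨hc, hy⟩ := hesc
        rw [ih rest (by simp at h ⊢; omega)]
        subst hc
        rcases hy with hy | hy <;> subst hy
        · -- escaped single quote: raw count and escaped count both rise by one
          have e1 : uqParQ '\'' ('\\' :: '\'' :: rest) = uqParQ '\'' rest := by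
            unfold uqParQ
            rw [uqCnt2, if_pos ⟨rfl, rfl⟩]
            rw [List.count_cons_of_ne (by decide), List.count_cons_self]
            congr 1
            omega
          have e2 : uqParQ '"' ('\\' :: '\'' :: rest) = uqParQ '"' rest := by
            unfold uqParQ
            rw [uqCnt2, if_neg (by simp)]
            cases rest with
            | nil => simp [uqCnt2, List.count_cons_of_ne (show ('\'' : Char) ≠ '"' by decide)]
            | cons z t =>
              rw [uqCnt2, if_neg (by rintro ⟨h1, -⟩; exact absurd h1 (by decide))]
              rw [List.count_cons_of_ne (by decide), List.count_cons_of_ne (by decide)]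
          have e3 : uqParE ('\\' :: '\'' :: rest) = uqParE rest := by
            unfold uqParE
            rw [List.count_cons_of_ne (by decide), List.count_cons_of_ne (by decide)]
          rw [e1, e2, e3]
        · -- escaped double quote
          have e1 : uqParQ '\'' ('\\' :: '"' :: rest) = uqParQ '\'' rest := by
            unfold uqParQ
            rw [uqCnt2, if_neg (by rintro ⟨-, h1⟩; exact absurd h1 (by decide))]
            cases rest with
            | nil => simp [uqCnt2, List.count_cons_of_ne (show ('"' : Char) ≠ '\'' by decide)]
            | cons z t =>
              rw [uqCnt2, if_neg (by rintro ⟨h1, -⟩; exact absurd h1 (by decide))]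
              rw [List.count_cons_of_ne (by decide), List.count_cons_of_ne (by decide)]
          have e2 : uqParQ '"' ('\\' :: '"' :: rest) = uqParQ '"' rest := by
            unfold uqParQ
            rw [uqCnt2, if_pos ⟨rfl, rfl⟩]
            rw [List.count_cons_of_ne (by decide), List.count_cons_self]
            congr 1
            omega
          have e3 : uqParE ('\\' :: '"' :: rest) = uqParE rest := by
            unfold uqParE
            rw [List.count_cons_of_ne (by decide), List.count_cons_of_ne (by decide)]
          rw [e1, e2, e3]
      · rw [if_neg hesc]
        rw [ih (c2 :: rest) (by simp at h ⊢; omega)]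
        exact uq_toggle_eq c (c2 :: rest) s d e
          (by rw [uqCnt2, if_neg (fun hx => hesc ⟨hx.1, Or.inl hx.2⟩)])
          (by rw [uqCnt2, if_neg (fun hx => hesc ⟨hx.1, Or.inr hx.2⟩)])

-- parity of the Int difference count - escaped_count vs the Nat sum (fmod by 2)
theorem uq_int_parity (a b : Nat) :
    (PySem.Int.mod ((a : Int) - (b : Int)) 2 == 1) = ((a + b) % 2 == 1) := by
  have hm : PySem.Int.mod ((a : Int) - (b : Int)) 2 = ((a : Int) - (b : Int)) % 2 := by
    simp [PySem.Int.mod, Int.fmod_eq_emod]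
  rw [hm]
  rcases Nat.mod_two_eq_zero_or_one (a + b) with h | h <;> simp [h] <;> omega

theorem uq_int_parity0 (a : Nat) :
    (PySem.Int.mod ((a : Int)) 2 == 1) = ((a % 2) == 1) := by
  have hm : PySem.Int.mod ((a : Int)) 2 = (a : Int) % 2 := by
    simp [PySem.Int.mod, Int.fmod_eq_emod]
  rw [hm]
  rcases Nat.mod_two_eq_zero_or_one a with h | h <;> simp [h] <;> omega

-- ===== VERDICT (by name: the statement is the Claim_ definition above) =====
theorem unbalanced_quotes_spec : Claim_equal_unbalanced_quotes := by
  intro s _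
  unfold Spec_unbalanced_quotes unbalanced_quotes unbalanced_quotes_alt
  simp only [uq_fold_counts, PySem.Str.count_eq]
  have h1 : ("\\'" : String).toList = ['\\', '\''] := rfl
  have h2 : ("\\\"" : String).toList = ['\\', '"'] := rfl
  rw [h1, h2, uq_count_two, uq_count_two]
  rw [uq_loop_eq s.toList.length s.toList le_rfl]
  simp only [zero_add, uq_int_parity, uq_int_parity0, Bool.false_xor]
  rfl
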